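-- pv_equiv track=rewrite | github.com/iSamarthDubey/Kartavya-PS-SIH25173.v1 | backend/src/core/nlp/advanced_schema_mapper.py | _infer_entity_type_from_field
-- ===== SOURCE A (Python) =====
-- from typing import Dict, List, Any, Optional, Tuple, Union
--
-- def _infer_entity_type_from_field(field_name: str) -> Optional[str]:
--     """Infer entity type from field name"""
--     field_lower = field_name.lower()
--
--     if any(keyword in field_lower for keyword in ["ip", "addr"]):
--         return "ip_address"
--     elif any(keyword in field_lower for keyword in ["user", "account"]):
--         return "username"
--     elif any(keyword in field_lower for keyword in ["port"]):
--         return "port"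
--     elif any(keyword in field_lower for keyword in ["process", "proc"]):
--         return "process_name"
--     elif any(keyword in field_lower for keyword in ["file", "path"]):
--         return "file_path"
--     elif any(keyword in field_lower for keyword in ["hash", "md5", "sha"]):
--         return "hash"
--     elif any(keyword in field_lower for keyword in ["time", "date"]):
--         return "timestamp"
--     elif any(keyword in field_lower for keyword in ["event", "code", "id"]):
--         return "event_id"
--
--     return None
-- ===== SOURCE B (Python) =====
-- _KEYWORDS = (("ip", 0), ("addr", 0), ("user", 1), ("account", 1), ("port", 2),
--              ("process", 3), ("proc", 3), ("file", 4), ("path", 4),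
--              ("hash", 5), ("md5", 5), ("sha", 5), ("time", 6), ("date", 6),
--              ("event", 7), ("code", 7), ("id", 7))
-- _TYPES = ("ip_address", "username", "port", "process_name", "file_path",
--           "hash", "timestamp", "event_id")
--
-- def _infer_entity_type_from_field(field_name: str):
--     # Sliding scan: at every position of the lowered string, see which keywords
--     # start there, and keep the minimum rule priority found anywhere.
--     s = field_name.lower()
--     best = 8
--     while s:
--         for kw, prio in _KEYWORDS:
--             if prio < best and s.startswith(kw):
--                 best = prio
--         s = s[1:]
--     return _TYPES[best] if best < 8 else None
-- ===== Notes on version B (the rewrite author's own statement) =====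
-- stated objective: alternative
-- what changed: Replaces the eight substring-containment branches by a position-driven sliding scan: walk the lowered string suffix by suffix, test keywords only as prefixes at each position, and accumulate the minimum rule priority, mapping it to a type at the end.
import Mathlib
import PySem

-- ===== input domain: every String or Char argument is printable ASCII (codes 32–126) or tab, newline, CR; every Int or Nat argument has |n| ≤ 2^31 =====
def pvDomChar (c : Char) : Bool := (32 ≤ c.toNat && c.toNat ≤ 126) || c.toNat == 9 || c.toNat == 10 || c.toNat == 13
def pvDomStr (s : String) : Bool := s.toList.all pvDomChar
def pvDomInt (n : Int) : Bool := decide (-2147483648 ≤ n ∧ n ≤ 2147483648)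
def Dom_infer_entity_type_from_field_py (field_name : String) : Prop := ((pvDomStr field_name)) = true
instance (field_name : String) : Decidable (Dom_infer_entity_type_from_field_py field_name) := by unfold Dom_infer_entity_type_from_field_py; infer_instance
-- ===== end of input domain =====

-- B replaces A's eight substring-containment branches by a position-driven sliding scan (prefix checks at each suffix, accumulating the minimum rule priority); alternative algorithm, same results.


-- ===== PORT A =====
def infer_entity_type_from_field_py (field_name : String) : Option String :=
  let field_lower := PySem.Str.lower field_name
  if ["ip", "addr"].any (fun k => PySem.Str.isIn k field_lower) then some "ip_address"
  else if ["user", "account"].any (fun k => PySem.Str.isIn k field_lower) then some "username"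
  else if ["port"].any (fun k => PySem.Str.isIn k field_lower) then some "port"
  else if ["process", "proc"].any (fun k => PySem.Str.isIn k field_lower) then some "process_name"
  else if ["file", "path"].any (fun k => PySem.Str.isIn k field_lower) then some "file_path"
  else if ["hash", "md5", "sha"].any (fun k => PySem.Str.isIn k field_lower) then some "hash"
  else if ["time", "date"].any (fun k => PySem.Str.isIn k field_lower) then some "timestamp"
  else if ["event", "code", "id"].any (fun k => PySem.Str.isIn k field_lower) then some "event_id"
  else none

-- ===== PORT B =====
-- _KEYWORDS: keyword with its rule priority
def pvKW : List (String × Nat) :=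
  [("ip", 0), ("addr", 0), ("user", 1), ("account", 1), ("port", 2),
   ("process", 3), ("proc", 3), ("file", 4), ("path", 4),
   ("hash", 5), ("md5", 5), ("sha", 5), ("time", 6), ("date", 6),
   ("event", 7), ("code", 7), ("id", 7)]

-- _TYPES
def pvTypes : List String :=
  ["ip_address", "username", "port", "process_name", "file_path", "hash", "timestamp", "event_id"]

-- the while-loop over the string: the state is the current suffix (s = s[1:] is the tail)
-- and the best priority so far; s.startswith(kw) is PySem.Chars.startswith on the suffix.
def pvScan : List Char → Nat → Nat
  | [], best => best
  | c :: t, best =>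
      pvScan t (pvKW.foldl
        (fun b e => if e.2 < b ∧ PySem.Chars.startswith (c :: t) e.1.toList then e.2 else b) best)

def infer_entity_type_from_field_py_alt (field_name : String) : Option String :=
  let s := PySem.Str.lower field_name
  let best := pvScan s.toList 8
  -- _TYPES[best] if best < 8 else None (the index is in range, so pyGet? is the returned string)
  if best < 8 then PySem.List.pyGet? pvTypes (best : Int) else none

-- ===== PRECONDITION & SPEC =====
def Spec_infer_entity_type_from_field_py (field_name : String) (out : Option String) : Prop := out = infer_entity_type_from_field_py_alt field_name
instance (field_name : String) (out : Option String) : Decidable (Spec_infer_entity_type_from_field_py field_name out) := by unfold Spec_infer_entity_type_from_field_py; infer_instance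

-- ===== CLAIM (what is proved, stated in full; the proofs are below) =====
def Claim_equal_infer_entity_type_from_field_py : Prop := ∀ (field_name : String), Dom_infer_entity_type_from_field_py field_name → Spec_infer_entity_type_from_field_py field_name (infer_entity_type_from_field_py field_name)

-- ===== LEMMAS AND PROOFS =====

-- the keyword groups of A's chain, in order
def pvGroups : List (List String) :=
  [["ip", "addr"], ["user", "account"], ["port"], ["process", "proc"], ["file", "path"],
   ["hash", "md5", "sha"], ["time", "date"], ["event", "code", "id"]]

-- index (from j) of the first group with a keyword satisfying q; j + length if none
def pvGo (q : String → Bool) : List (List String) → Nat → Nat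
  | [], j => j
  | g :: gs, j => if g.any q then j else pvGo q gs (j + 1)

-- first group with a keyword that is a prefix of cs (priority found at one position)
def pvAt (cs : List Char) : Nat :=
  pvGo (fun k => PySem.Chars.startswith cs k.toList) pvGroups 0

-- first group with a keyword occurring inside cs (= the branch A takes)
def pvGB (cs : List Char) : Nat :=
  pvGo (fun k => PySem.Chars.isIn k.toList cs) pvGroups 0

def pvOut (n : Nat) : Option String :=
  if n < 8 then PySem.List.pyGet? pvTypes (n : Int) else none

theorem pvGo_ge (q : String → Bool) (gs : List (List String)) (j : Nat) : j ≤ pvGo q gs j := by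
  induction gs generalizing j with
  | nil => simp [pvGo]
  | cons g gs ih =>
      simp only [pvGo]
      split
      · exact Nat.le_refl j
      · exact Nat.le_trans (Nat.le_succ j) (ih (j + 1))

theorem pvGo_le (q : String → Bool) (gs : List (List String)) (j : Nat) :
    pvGo q gs j ≤ j + gs.length := by
  induction gs generalizing j with
  | nil => simp [pvGo]
  | cons g gs ih =>
      simp only [pvGo]
      split
      · omega
      · have := ih (j + 1); simp only [List.length_cons]; omega

theorem pvGo_or (q₁ q₂ : String → Bool) (gs : List (List String)) (j : Nat) :
    pvGo (fun k => q₁ k || q₂ k) gs j = min (pvGo q₁ gs j) (pvGo q₂ gs j) := by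
  induction gs generalizing j with
  | nil => simp [pvGo]
  | cons g gs ih =>
      have hany : (g.any fun k => q₁ k || q₂ k) = (g.any q₁ || g.any q₂) := by
        rw [Bool.eq_iff_iff]
        simp only [List.any_eq_true, Bool.or_eq_true]
        constructor
        · rintro ⟨x, hx, h | h⟩
          · exact Or.inl ⟨x, hx, h⟩
          · exact Or.inr ⟨x, hx, h⟩
        · rintro (⟨x, hx, h⟩ | ⟨x, hx, h⟩)
          · exact ⟨x, hx, Or.inl h⟩
          · exact ⟨x, hx, Or.inr h⟩
      rcases h1 : g.any q₁ <;> rcases h2 : g.any q₂ <;> simp only [pvGo, hany, h1, h2] <;>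
        simp <;>
        first
          | exact ih (j + 1)
          | (have g1 := pvGo_ge q₁ gs (j + 1); have g2 := pvGo_ge q₂ gs (j + 1); omega)

-- the inner for-loop never updates once best is below every remaining priority
theorem pvInner_const (cs : List Char) (T : List (String × Nat)) (b : Nat)
    (h : ∀ e ∈ T, b ≤ e.2) :
    T.foldl (fun b e => if e.2 < b ∧ PySem.Chars.startswith cs e.1.toList then e.2 else b) b = b := by
  induction T with
  | nil => rfl
  | cons e T ih =>
      have he : b ≤ e.2 := h e (List.mem_cons_self ..)
      have : (if e.2 < b ∧ PySem.Chars.startswith cs e.1.toList then e.2 else b) = b := by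
        split
        · omega
        · rfl
      simp only [List.foldl_cons, this]
      exact ih (fun f hf => h f (List.mem_cons_of_mem _ hf))

-- on a priority-nondecreasing table the inner for-loop computes min with the first match
theorem pvInner_find (cs : List Char) (T : List (String × Nat))
    (hT : T.Pairwise (fun a b => a.2 ≤ b.2)) (b : Nat) :
    T.foldl (fun b e => if e.2 < b ∧ PySem.Chars.startswith cs e.1.toList then e.2 else b) b =
      (match T.find? (fun e => PySem.Chars.startswith cs e.1.toList) with
        | some e => min b e.2
        | none => b) := by
  induction T generalizing b with
  | nil => rfl
  | cons e T ih =>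
      rcases List.pairwise_cons.mp hT with ⟨hhead, htail⟩
      by_cases hp : PySem.Chars.startswith cs e.1.toList = true
      · have hstep : (if e.2 < b ∧ PySem.Chars.startswith cs e.1.toList then e.2 else b)
            = min b e.2 := by
          rcases Nat.lt_or_ge e.2 b with h | h
          · rw [if_pos ⟨h, hp⟩]; omega
          · rw [if_neg (fun hc => absurd hc.1 (by omega))]; omega
        have hrest := pvInner_const cs T (min b e.2)
          (fun f hf => Nat.le_trans (Nat.min_le_right _ _) (hhead f hf))
        rw [List.foldl_cons, hstep, hrest, List.find?_cons_of_pos (a := e) (l := T) (p := fun x => PySem.Chars.startswith cs x.1.toList) hp]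
      · have hstep : (if e.2 < b ∧ PySem.Chars.startswith cs e.1.toList then e.2 else b) = b :=
          if_neg (fun hc => hp hc.2)
        rw [List.foldl_cons, hstep, List.find?_cons_of_neg (a := e) (l := T) (p := fun x => PySem.Chars.startswith cs x.1.toList) hp, ih htail b]

-- the keyword table is the group list flattened with its group index as priority
def pvFlat : List (List String) → Nat → List (String × Nat)
  | [], _ => []
  | g :: gs, j => g.map (fun k => (k, j)) ++ pvFlat gs (j + 1)

theorem pvKW_flat : pvKW = pvFlat pvGroups 0 := by rfl

theorem pvFlat_find (q : String → Bool) :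
    ∀ (gs : List (List String)) (j b : Nat), b ≤ j + gs.length →
    (match (pvFlat gs j).find? (fun e => q e.1) with
      | some e => min b e.2
      | none => b) = min b (pvGo q gs j) := by
  intro gs
  induction gs with
  | nil =>
      intro j b hb
      simp only [List.length_nil] at hb
      show b = min b j
      omega
  | cons g gs ih =>
      intro j b hb
      simp only [pvFlat, List.find?_append, List.find?_map, pvGo]
      rcases hfind : g.find? q with _ | k
      · have hnone : List.find? ((fun e => q e.1) ∘ fun k => (k, j)) g = none := by
          simpa [Function.comp] using hfind
        have hany : g.any q = false := by
          rw [List.find?_eq_none] at hfind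
          simp only [Bool.eq_false_iff, ne_eq, List.any_eq_true]
          rintro ⟨x, hx, hq⟩
          exact hfind x hx hq
        simp only [hnone, hany, Bool.false_eq_true, if_false]
        exact ih (j + 1) b (by simpa [Nat.add_comm, Nat.add_left_comm] using hb)
      · have hq : q k = true := List.find?_some hfind
        have hmem : k ∈ g := List.mem_of_find?_eq_some hfind
        have hsome : List.find? ((fun e => q e.1) ∘ fun k => (k, j)) g = some k := by
          simpa [Function.comp] using hfind
        have hany : g.any q = true := List.any_eq_true.mpr ⟨k, hmem, hq⟩
        simp [hsome, hany]

-- the concrete table: first-match priority over pvKW is pvAt (the group chain)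
theorem pvFind_at (cs : List Char) (b : Nat) (hb : b ≤ 8) :
    (match pvKW.find? (fun e => PySem.Chars.startswith cs e.1.toList) with
      | some e => min b e.2
      | none => b) = min b (pvAt cs) := by
  rw [pvKW_flat]
  exact pvFlat_find (fun k => PySem.Chars.startswith cs k.toList) pvGroups 0 b (by simp [pvGroups]; omega)

theorem pvKW_pairwise : pvKW.Pairwise (fun a b => a.2 ≤ b.2) := by decide

-- one step of the sliding scan: the inner loop takes best to min best (pvAt suffix)
theorem pvInner_eq (cs : List Char) (b : Nat) (hb : b ≤ 8) :
    pvKW.foldl (fun b e => if e.2 < b ∧ PySem.Chars.startswith cs e.1.toList then e.2 else b) b =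
      min b (pvAt cs) := by
  rw [pvInner_find cs pvKW pvKW_pairwise b]
  exact pvFind_at cs b hb

-- containment in c :: t is prefix of c :: t or containment in t, groupwise
theorem pvGB_cons (c : Char) (t : List Char) :
    pvGB (c :: t) = min (pvAt (c :: t)) (pvGB t) := by
  have hq : (fun k => PySem.Chars.isIn k.toList (c :: t))
      = (fun (k : String) => PySem.Chars.startswith (c :: t) k.toList || PySem.Chars.isIn k.toList t) := by
    funext k
    rw [Bool.eq_iff_iff]
    constructor
    · intro h
      rcases List.infix_cons_iff.mp ((PySem.Chars.isIn_iff_infix _ _).mp h) with h' | h'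
      · refine Bool.or_eq_true_iff.mpr (Or.inl ?_)
        simp [PySem.Chars.startswith, List.isPrefixOf_iff_prefix, h']
      · refine Bool.or_eq_true_iff.mpr (Or.inr ?_)
        exact (PySem.Chars.isIn_iff_infix _ _).mpr h'
    · intro h
      rcases Bool.or_eq_true_iff.mp h with h' | h'
      · exact (PySem.Chars.isIn_iff_infix _ _).mpr
          (List.infix_cons_iff.mpr (Or.inl (by
            have := h'; simpa [PySem.Chars.startswith, List.isPrefixOf_iff_prefix] using this)))
      · exact (PySem.Chars.isIn_iff_infix _ _).mpr
          (List.infix_cons_iff.mpr (Or.inr ((PySem.Chars.isIn_iff_infix _ _).mp h')))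
  unfold pvGB pvAt
  rw [hq, pvGo_or]

theorem pvGB_le (cs : List Char) : pvGB cs ≤ 8 := by
  have := pvGo_le (fun k => PySem.Chars.isIn k.toList cs) pvGroups 0
  simpa [pvGroups] using this

-- the sliding scan computes min best (first infix-matching group)
theorem pvScan_eq (cs : List Char) : ∀ b : Nat, b ≤ 8 → pvScan cs b = min b (pvGB cs) := by
  induction cs with
  | nil =>
      intro b hb
      have h0 : pvGB [] = 8 := by decide
      simp only [pvScan, h0]; omega
  | cons c t ih =>
      intro b hb
      simp only [pvScan]
      rw [pvInner_eq (c :: t) b hb]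
      rw [ih (min b (pvAt (c :: t))) (Nat.le_trans (Nat.min_le_left _ _) hb)]
      rw [pvGB_cons]
      omega

-- A is the chain lookup pvOut ∘ pvGB
theorem pvA_eq (f : String) :
    infer_entity_type_from_field_py f = pvOut (pvGB (PySem.Chars.lower f.toList)) := by
  unfold infer_entity_type_from_field_py pvGB pvGroups
  simp only [pvGo, List.any_cons, List.any_nil, Bool.or_false, PySem.Str.isIn_eq,
    PySem.Str.toList_lower]
  split_ifs <;> rfl

-- B is the same lookup
theorem pvB_eq (f : String) :
    infer_entity_type_from_field_py_alt f = pvOut (pvGB (PySem.Chars.lower f.toList)) := by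
  unfold infer_entity_type_from_field_py_alt
  simp only [PySem.Str.toList_lower]
  rw [pvScan_eq _ 8 (Nat.le_refl 8)]
  have h := pvGB_le (PySem.Chars.lower f.toList)
  have hmin : min 8 (pvGB (PySem.Chars.lower f.toList)) = pvGB (PySem.Chars.lower f.toList) := by omega
  rw [hmin]
  rfl

-- ===== VERDICT (by name: the statement is the Claim_ definition above) =====
theorem infer_entity_type_from_field_py_spec : Claim_equal_infer_entity_type_from_field_py := by
  intro f _
  unfold Spec_infer_entity_type_from_field_py
  rw [pvA_eq, pvB_eq]
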